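-- pv_equiv track=rewrite | github.com/syazra/prak-daspro | Hackerrank/8/8B1_Soal Bergambar.py | RemoveS
-- ===== SOURCE A (Python) =====
-- def Konso(e,S):
--     return [e] + S
--
-- def FirstElmt(S):
--     return S[0]
--
-- def Tail(S):
--     return S[1:]
--
-- def IsEmpty(S):
--     return S == []
--
-- def RemoveS(S1, S2):
--     if IsEmpty(S1):
--         return S2
--     else:
--         if FirstElmt(S1) == FirstElmt(S2):
--             return RemoveS(Tail(S1), Tail(S2))
--         else:
--             return Konso(FirstElmt(S2), RemoveS(S1, Tail(S2)))
-- ===== SOURCE B (Python) =====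
-- def RemoveS(S1, S2):
--     it = iter(S2)
--     out = []
--     for a in S1:
--         x = next(it)
--         while x != a:
--             out.append(x)
--             x = next(it)
--     out.extend(it)
--     return out
-- ===== Notes on version B (the rewrite author's own statement) =====
-- stated objective: faster
-- what changed: Replaced the recursion over S2 that rebuilds the result with repeated [e]+S concatenations by an outer loop over S1 that consumes an iterator of S2, appending skipped elements and extending with the leftover tail.
import Mathlib
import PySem

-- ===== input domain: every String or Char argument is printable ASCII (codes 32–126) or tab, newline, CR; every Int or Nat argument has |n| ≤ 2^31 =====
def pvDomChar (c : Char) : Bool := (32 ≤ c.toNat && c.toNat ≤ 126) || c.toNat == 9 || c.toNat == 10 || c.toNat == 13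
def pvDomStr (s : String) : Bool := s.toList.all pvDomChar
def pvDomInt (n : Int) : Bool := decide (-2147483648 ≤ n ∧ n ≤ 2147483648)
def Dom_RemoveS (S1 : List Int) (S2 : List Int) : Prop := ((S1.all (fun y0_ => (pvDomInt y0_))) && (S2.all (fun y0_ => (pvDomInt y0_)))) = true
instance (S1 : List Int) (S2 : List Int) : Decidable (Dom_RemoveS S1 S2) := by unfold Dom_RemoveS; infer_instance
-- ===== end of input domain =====

-- B replaces A's per-element recursion over S2 (which rebuilds the result with
-- repeated [e]+S concatenations) by an outer loop over S1 consuming an iterator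
-- of S2 (objective: faster). Equivalence is claimed on Pre_: S1 an in-order
-- subsequence of S2; outside it both Pythons raise (A: IndexError, B: StopIteration).

-- ===== PORT A =====
-- A's recursion: empty S1 → S2; matching heads → recurse on both tails;
-- otherwise keep S2's head (Konso) and recurse on S2's tail.
-- When S1 ≠ [] and S2 = [], Python's FirstElmt(S2) raises IndexError (excluded
-- by Pre_); the port returns [] there.
def RemoveS (S1 : List Int) (S2 : List Int) : List Int :=
  match S1, S2 with
  | [], s2 => s2
  | _ :: _, [] => []
  | a :: t1, b :: t2 =>
      if a = b then RemoveS t1 t2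
      else b :: RemoveS (a :: t1) t2
termination_by S2.length

-- ===== PORT B =====
-- Source B's inner `while x != a` loop: split the iterator's remainder at the first
-- occurrence of a — (skipped prefix, some rest-after-a), or (everything, none)
-- when the iterator is exhausted first (Python: next() raises StopIteration).
def pvScanTo (a : Int) : List Int → List Int × Option (List Int)
  | [] => ([], none)
  | x :: r =>
      if x = a then ([], some r)
      else
        let pq := pvScanTo a r
        (x :: pq.1, pq.2)

-- Source B's outer `for a in S1` loop: state = (remaining iterator, out).
-- In the `none` case Python B raises StopIteration (excluded by Pre_);
-- the port returns what `out` holds then.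
def pvGoB (S1 : List Int) (rem : List Int) (out : List Int) : List Int :=
  match S1 with
  | [] => out ++ rem
  | a :: t1 =>
      match pvScanTo a rem with
      | (p, some r) => pvGoB t1 r (out ++ p)
      | (p, none) => out ++ p

def RemoveS_alt (S1 : List Int) (S2 : List Int) : List Int :=
  pvGoB S1 S2 []

-- ===== PRECONDITION & SPEC =====
-- Pre_ excludes exactly the inputs where A raises IndexError (and B raises
-- StopIteration): S1 must be an in-order subsequence of S2.
def Pre_RemoveS (S1 : List Int) (S2 : List Int) : Prop := S1.Sublist S2
instance (S1 : List Int) (S2 : List Int) : Decidable (Pre_RemoveS S1 S2) := by unfold Pre_RemoveS; infer_instance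
def pvWitness_RemoveS : List Int × List Int := ([1, 3], [1, 2, 3, 4])

def Spec_RemoveS (S1 : List Int) (S2 : List Int) (out : List Int) : Prop := out = RemoveS_alt S1 S2
instance (S1 : List Int) (S2 : List Int) (out : List Int) : Decidable (Spec_RemoveS S1 S2 out) := by unfold Spec_RemoveS; infer_instance

-- ===== CLAIM (what is proved, stated in full; the proofs are below) =====
def Claim_equal_RemoveS : Prop := ∀ (S1 : List Int) (S2 : List Int), Dom_RemoveS S1 S2 → Pre_RemoveS S1 S2 → Spec_RemoveS S1 S2 (RemoveS S1 S2)

-- ===== LEMMAS AND PROOFS =====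

-- Skipping a non-matching head is the same as moving it into the accumulator.
theorem pvGoB_cons_ne (a b : Int) (t1 t2 out : List Int) (hab : a ≠ b) :
    pvGoB (a :: t1) (b :: t2) out = pvGoB (a :: t1) t2 (out ++ [b]) := by
  rcases hpq : pvScanTo a t2 with ⟨p, q⟩
  have hscan : pvScanTo a (b :: t2) = (b :: p, q) := by
    simp [pvScanTo, Ne.symm hab, hpq]
  cases q with
  | some r => simp [pvGoB, hscan, hpq]
  | none => simp [pvGoB, hscan, hpq]

-- Main invariant: on a sublist, B's loop yields the accumulator followed by A's result.
theorem pvMain : ∀ (S2 S1 out : List Int), S1.Sublist S2 →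
    pvGoB S1 S2 out = out ++ RemoveS S1 S2 := by
  intro S2
  induction S2 with
  | nil =>
    intro S1 out h
    have : S1 = [] := List.sublist_nil.mp h
    subst this
    simp [pvGoB, RemoveS]
  | cons b t2 ih =>
    intro S1 out h
    cases S1 with
    | nil => simp [pvGoB, RemoveS]
    | cons a t1 =>
      by_cases hab : a = b
      · subst hab
        have hsub : t1.Sublist t2 := by
          cases h with
          | cons _ h' => exact (List.sublist_cons_self a t1).trans h'
          | cons₂ _ h' => exact h'
        have hscan : pvScanTo a (a :: t2) = ([], some t2) := by
          simp [pvScanTo]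
        simp only [pvGoB, hscan]
        rw [RemoveS, if_pos rfl]
        simpa using ih t1 out hsub
      · have hsub : (a :: t1).Sublist t2 := by
          cases h with
          | cons _ h' => exact h'
          | cons₂ _ h' => exact absurd rfl hab
        rw [pvGoB_cons_ne a b t1 t2 out hab]
        rw [RemoveS, if_neg hab]
        rw [ih (a :: t1) (out ++ [b]) hsub]
        simp

-- ===== VERDICT (by name: the statement is the Claim_ definition above) =====
theorem RemoveS_spec : Claim_equal_RemoveS := by
  intro S1 S2 _ hpre
  unfold Spec_RemoveS RemoveS_alt
  rw [pvMain S2 S1 [] hpre]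
  simp
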